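-- pv_equiv track=rewrite | github.com/kulraghav/CodePractice | practice.py | pow_set
-- ===== SOURCE A (Python) =====
-- def pow_set(counts):
--     if not counts:
--         return [[]]
--
--     counts_tail = {}
--     for key in counts:
--         counts_tail[key] = counts[key]
--
--     a = list(counts_tail.keys())[0]
--     count_a = counts_tail[a]
--
--     del counts_tail[a]
--
--     subsets_tail = pow_set(counts_tail)
--
--     subsets = []
--     for s in subsets_tail:
--         subsets.append(s)
--         for k in range(1, count_a + 1):
--             s_a = k*[a]
--             for i in range(len(s)):
--                 s_a.append(s[i])
--             subsets.append(s_a)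
--
--     return subsets
-- ===== SOURCE B (Python) =====
-- def pow_set(counts):
--     subsets = [[]]
--     for key, cnt in reversed(list(counts.items())):
--         prefixes = [[]] + [k * [key] for k in range(1, cnt + 1)]
--         subsets = [p + s for s in subsets for p in prefixes]
--     return subsets
-- ===== Notes on version B (the rewrite author's own statement) =====
-- stated objective: simpler
-- what changed: Replaces A's recursion, which re-copies the remaining dict at every level and grows each subset by element-wise appends, with a single iterative fold over the keys in reversed insertion order that rebuilds the subset list by a comprehension over precomputed prefixes.
import Mathlib
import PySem

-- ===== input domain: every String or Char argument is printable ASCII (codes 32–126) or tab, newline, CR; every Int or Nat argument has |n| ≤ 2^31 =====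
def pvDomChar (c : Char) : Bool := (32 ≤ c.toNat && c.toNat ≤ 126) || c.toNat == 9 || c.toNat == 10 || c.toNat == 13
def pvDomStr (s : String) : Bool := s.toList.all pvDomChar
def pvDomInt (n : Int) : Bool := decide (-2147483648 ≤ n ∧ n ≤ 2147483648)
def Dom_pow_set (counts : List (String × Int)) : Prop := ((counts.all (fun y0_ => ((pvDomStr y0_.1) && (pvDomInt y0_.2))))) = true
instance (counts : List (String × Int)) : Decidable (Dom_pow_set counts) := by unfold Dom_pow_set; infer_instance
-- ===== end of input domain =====

-- B replaces A's recursion (which re-copies the dict at every level) with an iterative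
-- fold over the keys in reversed insertion order, building each block with a comprehension
-- (objective: simpler).

-- ===== PORT A =====
-- The dict argument is the association list `counts` (insertion order, unique keys).
-- A's dict copy loop, `list(keys())[0]`, and `del` of the first key are, on that
-- representation, exactly head/tail of the list, so the recursion is structural.
def pow_set : List (String × Int) → List (List String)
  | [] => [[]]                                         -- if not counts: return [[]]
  | (a, count_a) :: counts_tail =>
    let subsets_tail := pow_set counts_tail            -- recurse on the dict minus its first key
    subsets_tail.foldl                                 -- for s in subsets_tail:
      (fun subsets s =>
        (PySem.List.pyRange 1 (count_a + 1) 1).foldl   --   for k in range(1, count_a + 1):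
          (fun subsets k => subsets ++ [List.replicate k.toNat a ++ s])  -- s_a = k*[a]; append each s[i]; subsets.append(s_a)
          (subsets ++ [s]))                            --   subsets.append(s)
      []

-- ===== PORT B =====
def pow_set_alt (counts : List (String × Int)) : List (List String) :=
  counts.reverse.foldl                                 -- for key, cnt in reversed(list(counts.items())):
    (fun subsets kc =>
      let prefixes :=                                  --   prefixes = [[]] + [k*[key] for k in range(1, cnt+1)]
        ([] : List String) ::
          (PySem.List.pyRange 1 (kc.2 + 1) 1).map (fun k => List.replicate k.toNat kc.1)
      subsets.flatMap (fun s => prefixes.map (fun p => p ++ s)))  -- [p + s for s in subsets for p in prefixes]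
    [[]]

-- ===== PRECONDITION & SPEC =====
def Spec_pow_set (counts : List (String × Int)) (out : List (List String)) : Prop := out = pow_set_alt counts
instance (counts : List (String × Int)) (out : List (List String)) : Decidable (Spec_pow_set counts out) := by unfold Spec_pow_set; infer_instance

-- ===== CLAIM (what is proved, stated in full; the proofs are below) =====
def Claim_equal_pow_set : Prop := ∀ (counts : List (String × Int)), Dom_pow_set counts → Spec_pow_set counts (pow_set counts)

-- ===== LEMMAS AND PROOFS =====

-- B on a cons: one reversed-fold step is one block of the flatMap.
theorem pow_set_alt_cons (x : String × Int) (t : List (String × Int)) :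
    pow_set_alt (x :: t) =
      (pow_set_alt t).flatMap
        (fun s =>
          (([] : List String) ::
              (PySem.List.pyRange 1 (x.2 + 1) 1).map (fun k => List.replicate k.toNat x.1)).map
            (fun p => p ++ s)) := by
  simp [pow_set_alt, List.reverse_cons, List.foldl_append]

-- A on a cons: the nested append loops compute the same flatMap block.
theorem pow_set_cons (a : String) (c : Int) (t : List (String × Int)) :
    pow_set ((a, c) :: t) =
      (pow_set t).flatMap
        (fun s =>
          (([] : List String) ::
              (PySem.List.pyRange 1 (c + 1) 1).map (fun k => List.replicate k.toNat a)).map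
            (fun p => p ++ s)) := by
  show (pow_set t).foldl _ [] = _
  have h : (fun (subsets : List (List String)) (s : List String) =>
        (PySem.List.pyRange 1 (c + 1) 1).foldl
          (fun subsets k => subsets ++ [List.replicate k.toNat a ++ s])
          (subsets ++ [s]))
      = fun subsets s => subsets ++
          (s :: (PySem.List.pyRange 1 (c + 1) 1).map (fun k => List.replicate k.toNat a ++ s)) := by
    funext subsets s
    rw [PySem.List.foldl_append_singleton_eq_map]
    simp
  rw [h, PySem.List.foldl_append_eq_flatMap]
  simp [Function.comp_def]

-- ===== VERDICT (by name: the statement is the Claim_ definition above) =====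
theorem pow_set_eq_alt (counts : List (String × Int)) : pow_set counts = pow_set_alt counts := by
  induction counts with
  | nil => rfl
  | cons x t ih =>
    obtain ⟨a, c⟩ := x
    rw [pow_set_cons, pow_set_alt_cons, ih]

theorem pow_set_spec : Claim_equal_pow_set := by
  intro counts _
  exact pow_set_eq_alt counts
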